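-- pv_equiv track=rewrite | github.com/PacktPublishing/Functional-Python-Programming-3rd-Edition | Chapter07/ch07_ex4.py | legs_m
-- ===== SOURCE A (Python) =====
-- from collections.abc import Iterator, Iterable
-- from typing import Any, TypeVar
-- from collections.abc import Iterator, Iterable, Sequence
-- from typing import Any, TypeVar
-- from collections.abc import Sequence, Iterator, Iterable
-- from typing import Any, TypeVar
--
-- LL_Type = TypeVar("LL_Type")
--
-- def legs_m(
--     lat_lon_src: Iterator[LL_Type] | Sequence[LL_Type],
-- ) -> Iterator[tuple[LL_Type, LL_Type]]:
--
--     match lat_lon_src: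
--         case Sequence():
--             lat_lon_iter = iter(lat_lon_src)
--         case Iterator() as lat_lon_iter:
--             pass
--         case _:
--             raise TypeError("not an Iterator or Sequence")
--
--     begin = next(lat_lon_iter)
--     for end in lat_lon_iter:
--         yield begin, end
--         begin = end
-- ===== SOURCE B (Python) =====
-- from collections.abc import Iterator, Iterable, Sequence
-- from typing import Any, TypeVar
-- import itertools
--
-- LL_Type = TypeVar("LL_Type")
--
-- def legs_m(
--     lat_lon_src: Iterator[LL_Type] | Sequence[LL_Type],
-- ) -> Iterator[tuple[LL_Type, LL_Type]]:
--
--     match lat_lon_src: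
--         case Sequence():
--             lat_lon_iter = iter(lat_lon_src)
--         case Iterator() as lat_lon_iter:
--             pass
--         case _:
--             raise TypeError("not an Iterator or Sequence")
--
--     a, b = itertools.tee(lat_lon_iter)
--     next(b)  # StopIteration on empty input escapes the generator -> RuntimeError, like A
--     yield from zip(a, b)
-- ===== Notes on version B (the rewrite author's own statement) =====
-- stated objective: idiomatic
-- what changed: Replaces the explicit begin/end carrying loop with itertools.tee plus an offset zip of the two iterator copies.
import Mathlib
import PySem

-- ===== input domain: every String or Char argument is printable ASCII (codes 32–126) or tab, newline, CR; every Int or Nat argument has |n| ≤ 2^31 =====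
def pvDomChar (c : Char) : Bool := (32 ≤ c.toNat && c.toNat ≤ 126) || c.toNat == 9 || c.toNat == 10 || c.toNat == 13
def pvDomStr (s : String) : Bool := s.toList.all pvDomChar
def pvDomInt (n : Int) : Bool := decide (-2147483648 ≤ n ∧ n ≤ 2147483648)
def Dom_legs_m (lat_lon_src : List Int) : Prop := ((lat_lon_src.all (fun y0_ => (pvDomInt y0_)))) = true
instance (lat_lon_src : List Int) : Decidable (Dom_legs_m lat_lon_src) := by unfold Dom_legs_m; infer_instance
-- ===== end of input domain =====

-- B replaces A's explicit begin/end loop by tee + offset zip (idiomatic); equal return value on nonempty input.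

-- ===== PORT A =====
-- A's loop: keep `begin`, for each `end` yield (begin, end) and set begin := end.
def legsLoop (b : Int) (rest : List Int) : List (Int × Int) :=
  match rest with
  | [] => []
  | e :: r => (b, e) :: legsLoop e r

def legs_m (lat_lon_src : List Int) : List (Int × Int) :=
  match lat_lon_src with
  | [] => []      -- unreachable under Pre_ (next() raises → RuntimeError)
  | b :: rest => legsLoop b rest

-- ===== PORT B =====
-- tee gives two copies; next(b) drops the first element of the second; zip pairs them.
def legs_m_alt (lat_lon_src : List Int) : List (Int × Int) :=
  List.zip lat_lon_src lat_lon_src.tail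

-- ===== PRECONDITION & SPEC =====
-- Pre_ excludes only the empty list, on which A (and B) raise RuntimeError.
def Pre_legs_m (lat_lon_src : List Int) : Prop := lat_lon_src ≠ []
instance (lat_lon_src : List Int) : Decidable (Pre_legs_m lat_lon_src) := by unfold Pre_legs_m; infer_instance
def pvWitness_legs_m : List Int := [1, 2, 3]

def Spec_legs_m (lat_lon_src : List Int) (out : List (Int × Int)) : Prop := out = legs_m_alt lat_lon_src
instance (lat_lon_src : List Int) (out : List (Int × Int)) : Decidable (Spec_legs_m lat_lon_src out) := by unfold Spec_legs_m; infer_instance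

-- ===== CLAIM (what is proved, stated in full; the proofs are below) =====
def Claim_equal_legs_m : Prop := ∀ (lat_lon_src : List Int), Dom_legs_m lat_lon_src → Pre_legs_m lat_lon_src → Spec_legs_m lat_lon_src (legs_m lat_lon_src)

-- ===== LEMMAS AND PROOFS =====
theorem legsLoop_eq_zip (rest : List Int) : ∀ b : Int, legsLoop b rest = List.zip (b :: rest) rest := by
  induction rest with
  | nil => intro b; rfl
  | cons e r ih => intro b; simp [legsLoop, List.zip, ih e]

-- ===== VERDICT (by name: the statement is the Claim_ definition above) =====
theorem legs_m_spec : Claim_equal_legs_m := by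
  intro xs _ hpre
  unfold Spec_legs_m legs_m legs_m_alt
  match xs with
  | [] => exact absurd rfl hpre
  | b :: rest => simpa using legsLoop_eq_zip rest b
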